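-- pv_equiv track=rewrite | github.com/vanyu51/disasm | disasm.py | res_sym
-- ===== SOURCE A (Python) =====
-- def symbols(m):
--     a = '-'
--     b = '-'
--     al = 'PbqsdKrk'
--     for i in m:
--         if i in al:
--             a = i
--     for i in m:
--         if i in al and a != i:
--             b = i
--     s = ''
--     for i in al:
--         if a == i:
--             s += a
--         if b == i:
--             s += b
--     return(s)
--
-- def res_sym(mask1, mask2):
--     sym = symbols(mask1)
--     k = []
--     s = ''
--     for i in sym:
--         s = ''
--         if i != '-':
--             for j in range(len(mask1)):
--                 if mask1[j] == i:
--                     s += str(mask2[j])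
--             k.append(i + s)
--     return k
-- ===== SOURCE B (Python) =====
-- def res_sym(mask1, mask2):
--     al = 'PbqsdKrk'
--     a = '-'
--     b = '-'
--     for ch in mask1:
--         if ch in al and ch != a:
--             b = a
--             a = ch
--     targets = [c for c in (a, b) if c != '-']
--     groups = {}
--     for j, ch in enumerate(mask1):
--         if ch in targets:
--             groups.setdefault(ch, []).append(mask2[j])
--     return [c + ''.join(groups[c]) for c in al if c in targets]
-- ===== Notes on version B (the rewrite author's own statement) =====
-- stated objective: simpler
-- what changed: B replaces A's helper's three sequential scans plus a per-symbol rescan of mask1 with one combined pass tracking the (last, previous-distinct) symbol pair and one grouping pass over enumerate(mask1) appending mask2[j] into a per-symbol dict entry, emitted in alphabet order via join.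
import Mathlib
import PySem

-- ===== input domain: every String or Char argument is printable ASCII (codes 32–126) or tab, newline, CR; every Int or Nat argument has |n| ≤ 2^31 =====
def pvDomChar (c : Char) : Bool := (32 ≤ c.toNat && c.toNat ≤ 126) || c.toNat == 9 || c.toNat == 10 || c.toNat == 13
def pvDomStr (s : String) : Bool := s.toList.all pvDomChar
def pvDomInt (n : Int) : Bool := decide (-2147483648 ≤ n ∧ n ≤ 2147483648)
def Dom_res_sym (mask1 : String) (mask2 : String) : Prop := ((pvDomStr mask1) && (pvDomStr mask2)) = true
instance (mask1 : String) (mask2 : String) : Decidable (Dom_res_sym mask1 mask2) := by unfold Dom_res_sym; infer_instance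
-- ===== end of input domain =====

-- B replaces A's repeated scans (three passes in symbols, then a rescan of mask1 per symbol)
-- with one pair-tracking pass and one dict-grouping pass; same return value, simpler shape.


-- ===== PORT A =====
-- the constant string al = 'PbqsdKrk' (a char is "in al" iff it is a member of this list)
def pvAlA : List Char := "PbqsdKrk".toList

-- helper symbols(m): three sequential scans, then a push-fold over al
def symbolsA (m : List Char) : List Char :=
  let a := m.foldl (fun a i => if i ∈ pvAlA then i else a) '-'
  let b := m.foldl (fun b i => if i ∈ pvAlA ∧ a ≠ i then i else b) '-'
  pvAlA.foldl (fun s i =>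
    let s := if a = i then s ++ [a] else s
    if b = i then s ++ [b] else s) []

def res_sym (mask1 : String) (mask2 : String) : List String :=
  let m1 := mask1.toList
  let m2 := mask2.toList
  let sym := symbolsA m1
  -- for i in sym: s = ''; if i != '-': (inner scan of range(len(mask1))); k.append(i + s)
  (sym.foldl (fun (st : List String × List Char) i =>
    let s : List Char := []
    if i ≠ '-' then
      let s := (PySem.List.pyRange 0 (m1.length : Int) 1).foldl (fun s j =>
        if PySem.List.pyGetD m1 j ' ' = i then s ++ [PySem.List.pyGetD m2 j ' '] else s) s
      (st.1 ++ [String.ofList (i :: s)], s)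
    else (st.1, s)) (([] : List String), ([] : List Char))).1

-- ===== PORT B =====
def pvAlB : List Char := "PbqsdKrk".toList

def res_sym_alt (mask1 : String) (mask2 : String) : List String :=
  let m1 := mask1.toList
  let m2 := mask2.toList
  -- one pass: a = last al-symbol so far, b = previous distinct al-symbol
  let ab := m1.foldl (fun (p : Char × Char) ch =>
      if ch ∈ pvAlB ∧ ch ≠ p.1 then (ch, p.1) else p) ('-', '-')
  let targets := [ab.1, ab.2].filter (fun c => c ≠ '-')
  -- one grouping pass: groups[ch] += mask2[j]
  let groups := (PySem.List.enumerate m1 0).foldl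
      (fun (g : PySem.Dict Char (List Char)) jc =>
        if jc.2 ∈ targets then
          g.insert jc.2 ((g.getD jc.2 []) ++ [PySem.List.pyGetD m2 jc.1 ' '])
        else g) PySem.Dict.empty
  (pvAlB.filter (fun c => c ∈ targets)).map (fun c => String.ofList (c :: groups.getD c []))

-- ===== PRECONDITION & SPEC =====
-- A raises IndexError when some position of mask1 holding an al-symbol is beyond the end of
-- mask2 (B raises there too); Pre_ excludes exactly those inputs.
def Pre_res_sym (mask1 : String) (mask2 : String) : Prop :=
  ∀ j : Nat, j < mask1.toList.length → mask1.toList.getD j ' ' ∈ pvAlA → j < mask2.toList.length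
instance (mask1 : String) (mask2 : String) : Decidable (Pre_res_sym mask1 mask2) := by
  unfold Pre_res_sym; infer_instance
def pvWitness_res_sym : String × String := ("PbP", "123")
def Spec_res_sym (mask1 : String) (mask2 : String) (out : List String) : Prop := out = res_sym_alt mask1 mask2
instance (mask1 : String) (mask2 : String) (out : List String) : Decidable (Spec_res_sym mask1 mask2 out) := by unfold Spec_res_sym; infer_instance

-- ===== CLAIM (what is proved, stated in full; the proofs are below) =====
def Claim_equal_res_sym : Prop := ∀ (mask1 : String) (mask2 : String), Dom_res_sym mask1 mask2 → Pre_res_sym mask1 mask2 → Spec_res_sym mask1 mask2 (res_sym mask1 mask2)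


-- ===== LEMMAS AND PROOFS =====

-- abbreviations for A's three scans (proof-side only)
def pvA (m : List Char) : Char := m.foldl (fun a i => if i ∈ pvAlA then i else a) '-'
def pvB (m : List Char) (a : Char) : Char := m.foldl (fun b i => if i ∈ pvAlA ∧ a ≠ i then i else b) '-'

theorem pvA_snoc (m : List Char) (x : Char) :
    pvA (m ++ [x]) = if x ∈ pvAlA then x else pvA m := by
  simp [pvA]

theorem pvB_snoc (m : List Char) (x a : Char) :
    pvB (m ++ [x]) a = if x ∈ pvAlA ∧ a ≠ x then x else pvB m a := by
  simp [pvB]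

-- if x is not the last al-symbol, the "last al-symbol ≠ x" scan returns the last al-symbol
theorem pvB_of_ne (m : List Char) (x : Char) (h : pvA m ≠ x) : pvB m x = pvA m := by
  induction m using List.reverseRecOn with
  | nil => simp [pvA, pvB]
  | append_singleton l y ih =>
      rw [pvA_snoc] at *
      rw [pvB_snoc]
      by_cases hy : y ∈ pvAlA
      · simp only [hy, if_true] at h ⊢
        simp [Ne.symm h]
      · simp only [hy, if_false] at h ⊢
        simp [ih h]

-- B's single pass computes A's pair (a, b)
theorem pvAlB_eq : pvAlB = pvAlA := rfl

theorem pv_pair (m : List Char) :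
    m.foldl (fun (p : Char × Char) ch =>
      if ch ∈ pvAlB ∧ ch ≠ p.1 then (ch, p.1) else p) ('-', '-')
    = (pvA m, pvB m (pvA m)) := by
  induction m using List.reverseRecOn with
  | nil => simp [pvA, pvB]
  | append_singleton l y ih =>
      rw [List.foldl_append, ih, pvA_snoc, pvB_snoc]
      simp only [List.foldl_cons, List.foldl_nil, pvAlB_eq]
      by_cases hy : y ∈ pvAlA
      · by_cases hxy : y = pvA l
        · simp [hxy]
        · simp [hy, hxy, pvB_of_ne l y (fun h => hxy h.symm)]
      · simp [hy]

-- the second scan never returns a (unless '-')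
theorem pvB_ne (m : List Char) (a : Char) : pvB m a = '-' ∨ pvB m a ≠ a := by
  induction m using List.reverseRecOn with
  | nil => simp [pvB]
  | append_singleton l y ih =>
      rw [pvB_snoc]
      by_cases hy : y ∈ pvAlA ∧ a ≠ y
      · exact Or.inr (by simp [hy, Ne.symm hy.2])
      · simp [hy, ih]

-- the push-fold in symbols is a filter of al
theorem pv_pushfold (l : List Char) (a b : Char) (acc : List Char)
    (hl : '-' ∉ l) (hab : a = b → a = '-') :
    l.foldl (fun s i =>
      let s := if a = i then s ++ [a] else s
      if b = i then s ++ [b] else s) acc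
    = acc ++ l.filter (fun i => a = i ∨ b = i) := by
  induction l generalizing acc with
  | nil => simp
  | cons i l ih =>
      have hi : i ≠ '-' := fun h => hl (h ▸ List.mem_cons_self)
      have hl' : '-' ∉ l := fun h => hl (List.mem_cons_of_mem _ h)
      simp only [List.foldl_cons]
      rw [ih _ hl']
      by_cases ha : a = i <;> by_cases hb : b = i
      · have : a = '-' := hab (ha.trans hb.symm)
        exact absurd (ha.symm.trans this) hi
      · simp [ha, hb]
      · simp [ha, hb]
      · simp [ha, hb]

-- A's outer loop builds the map over sym
theorem pv_outer (sym : List Char) (acc : List String) (s0 : List Char)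
    (F : Char → List Char) (h : ∀ i ∈ sym, i ≠ '-') :
    ((sym.foldl (fun (st : List String × List Char) i =>
        let s : List Char := []
        if i ≠ '-' then
          let s := F i
          (st.1 ++ [String.ofList (i :: s)], s)
        else (st.1, s)) (acc, s0)).1)
    = acc ++ sym.map (fun i => String.ofList (i :: F i)) := by
  induction sym generalizing acc s0 with
  | nil => simp
  | cons i l ih =>
      have hi := h i List.mem_cons_self
      simp only [List.foldl_cons, hi, if_true, ne_eq, not_false_iff]
      rw [ih _ _ (fun j hj => h j (List.mem_cons_of_mem _ hj))]
      simp

-- a conditional append fold is filter-then-map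
theorem pv_condfold (c : Char) (g : Int × Char → Char) (L : List (Int × Char))
    (acc : List Char) :
    L.foldl (fun s jc => if jc.2 = c then s ++ [g jc] else s) acc
    = acc ++ (L.filter (fun jc => jc.2 = c)).map g := by
  induction L generalizing acc with
  | nil => simp
  | cons jc L ih =>
      by_cases h : jc.2 = c <;> simp [h, ih]

-- the grouping dict accumulates exactly the filtered values
theorem pv_dict (T : List Char) (g0 : PySem.Dict Char (List Char))
    (f : Int × Char → Char) (L : List (Int × Char)) (c : Char) (hc : c ∈ T) :
    (L.foldl (fun (g : PySem.Dict Char (List Char)) jc =>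
        if jc.2 ∈ T then g.insert jc.2 ((g.getD jc.2 []) ++ [f jc]) else g) g0).getD c []
    = g0.getD c [] ++ (L.filter (fun jc => jc.2 = c)).map f := by
  induction L generalizing g0 with
  | nil => simp
  | cons jc L ih =>
      by_cases h : jc.2 ∈ T
      · simp only [List.foldl_cons, h, if_true]
        rw [ih, PySem.Dict.getD_insert]
        by_cases hcc : c = jc.2
        · simp [hcc, List.append_assoc]
        · have hcc' : ¬ jc.2 = c := fun h' => hcc (Eq.symm h')
          simp [hcc, hcc']
      · have hcc' : ¬ jc.2 = c := fun h' => h (h' ▸ hc)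
        simp only [List.foldl_cons, h, if_false]
        rw [ih]
        simp [hcc']

-- symbols(m) is a filter of al
theorem symbolsA_eq (m : List Char) :
    symbolsA m = pvAlA.filter (fun i => pvA m = i ∨ pvB m (pvA m) = i) := by
  have hab : pvA m = pvB m (pvA m) → pvA m = '-' := by
    intro h
    rcases pvB_ne m (pvA m) with h1 | h1
    · exact h.trans h1
    · exact absurd h.symm h1
  simpa [symbolsA, pvA, pvB] using
    pv_pushfold pvAlA (pvA m) (pvB m (pvA m)) [] (by decide) hab

-- A's inner rescan of mask1 is a filter of enumerate(mask1)
theorem innerA_eq (m1 m2 : List Char) (c : Char) :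
    (PySem.List.pyRange 0 (m1.length : Int) 1).foldl
      (fun s j => if PySem.List.pyGetD m1 j ' ' = c then s ++ [PySem.List.pyGetD m2 j ' '] else s) []
    = ((PySem.List.enumerate m1 0).filter (fun jc => jc.2 = c)).map
        (fun jc => PySem.List.pyGetD m2 jc.1 ' ') := by
  have h := pv_condfold c (fun jc => PySem.List.pyGetD m2 jc.1 ' ') (PySem.List.enumerate m1 0) []
  rw [List.nil_append] at h
  rw [← h, PySem.List.enumerate_eq_map_pyRange m1 ' ', List.foldl_map]
  simp [PySem.List.len]

-- ===== VERDICT (by name: the statement is the Claim_ definition above) =====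
set_option maxRecDepth 8192 in
theorem res_sym_spec : Claim_equal_res_sym := by
  intro mask1 mask2 _ _
  unfold Spec_res_sym
  have hdash : '-' ∉ pvAlA := by decide
  have hal : ∀ x ∈ pvAlA, x ≠ '-' := fun x hx h => hdash (h ▸ hx)
  have hsym := symbolsA_eq mask1.toList
  have hne : ∀ i ∈ symbolsA mask1.toList, i ≠ '-' := by
    intro i hi
    rw [hsym] at hi
    exact hal i (List.mem_filter.mp hi).1
  have hA : res_sym mask1 mask2
      = (symbolsA mask1.toList).map (fun i => String.ofList (i ::
          (PySem.List.pyRange 0 (mask1.toList.length : Int) 1).foldl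
            (fun s j => if PySem.List.pyGetD mask1.toList j ' ' = i
              then s ++ [PySem.List.pyGetD mask2.toList j ' '] else s) [])) := by
    simpa [res_sym] using pv_outer (symbolsA mask1.toList) [] [] _ hne
  rw [hA, hsym]
  simp only [res_sym_alt]
  rw [pv_pair]
  simp only [pvAlB_eq]
  have hfil : pvAlA.filter (fun i => pvA mask1.toList = i ∨ pvB mask1.toList (pvA mask1.toList) = i)
      = pvAlA.filter (fun c =>
          c ∈ [pvA mask1.toList, pvB mask1.toList (pvA mask1.toList)].filter (fun c => c ≠ '-')) := by
    apply List.filter_congr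
    intro x hx
    have hx' : x ≠ '-' := hal x hx
    by_cases h1 : pvA mask1.toList = x
    · simp [h1, hx', List.mem_filter]
    · by_cases h2 : pvB mask1.toList (pvA mask1.toList) = x
      · simp [h1, h2, hx', List.mem_filter]
      · have h1' : ¬ x = pvA mask1.toList := fun h => h1 h.symm
        have h2' : ¬ x = pvB mask1.toList (pvA mask1.toList) := fun h => h2 h.symm
        simp [h1, h2, h1', h2', List.mem_filter]
  rw [hfil]
  apply List.map_congr_left
  intro c hc
  have hcT : c ∈ [pvA mask1.toList, pvB mask1.toList (pvA mask1.toList)].filter (fun c => c ≠ '-') :=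
    of_decide_eq_true (List.mem_filter.mp hc).2
  rw [innerA_eq mask1.toList mask2.toList c,
      pv_dict _ PySem.Dict.empty (fun jc => PySem.List.pyGetD mask2.toList jc.1 ' ')
        (PySem.List.enumerate mask1.toList 0) c hcT]
  simp
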